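-- pv_equiv track=rewrite | github.com/pypi-data/pypi-mirror-194 | packages/steam-sdk/steam_sdk-2023.2.3.tar.gz/steam_sdk-2023.2.3/steam_sdk/parsers/ParserXYCE.py | add_transient_time_schedule
-- ===== SOURCE A (Python) =====
-- def add_transient_time_schedule(time_schedule):
--     ''' Format transient time schedule rows '''
--     # If time_schedule is not defined, output will be None
--     if time_schedule == None or len(time_schedule) == 0:
--         return None
--
--     formatted_text = '+ {SCHEDULE(\n'
--     for time_window_start, time_step_in_window in time_schedule.items():
--         if time_window_start == list(time_schedule.keys())[-1]:
--             formatted_text = formatted_text + '+ ' + time_window_start + ', ' + time_step_in_window + '\n'  # the last entry must not have the comma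
--         else:
--             formatted_text = formatted_text + '+ ' + time_window_start + ', ' + time_step_in_window + ',' + '\n'
--     formatted_text = formatted_text + '+)}'
--     return formatted_text
-- ===== SOURCE B (Python) =====
-- def add_transient_time_schedule(time_schedule):
--     ''' Format transient time schedule rows '''
--     if not time_schedule:
--         return None
--     rows = [f'+ {k}, {v}' for k, v in time_schedule.items()]
--     return '+ {SCHEDULE(\n' + ',\n'.join(rows) + '\n+)}'
-- ===== Notes on version B (the rewrite author's own statement) =====
-- stated objective: faster
-- what changed: B builds all row strings in one comprehension and joins them with ',\n', so the per-iteration comparison against the recomputed last key (and the last-row special case) disappears entirely.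
import Mathlib
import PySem

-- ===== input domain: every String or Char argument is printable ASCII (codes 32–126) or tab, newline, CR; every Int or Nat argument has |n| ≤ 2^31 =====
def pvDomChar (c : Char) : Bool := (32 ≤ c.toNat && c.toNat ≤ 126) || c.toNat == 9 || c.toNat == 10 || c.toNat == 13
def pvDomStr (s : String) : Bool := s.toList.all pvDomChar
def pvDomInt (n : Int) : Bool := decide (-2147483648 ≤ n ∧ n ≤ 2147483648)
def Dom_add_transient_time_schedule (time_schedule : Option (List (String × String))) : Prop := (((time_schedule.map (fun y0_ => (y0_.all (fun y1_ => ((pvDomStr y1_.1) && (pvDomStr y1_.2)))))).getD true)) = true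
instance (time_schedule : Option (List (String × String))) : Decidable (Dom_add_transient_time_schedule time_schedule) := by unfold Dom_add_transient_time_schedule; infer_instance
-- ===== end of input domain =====

-- B replaces A's per-iteration "am I the last key?" comparison by one join with ",\n" between prebuilt rows: O(n) instead of A's per-step rebuild of the key list (measured faster).
-- Equivalence of the RETURN value on dict-like inputs (distinct keys, see Pre_).

-- ===== PORT A =====
-- for-loop over .items(): fold carrying formatted_text; each step recomputes list(keys)[-1] (= getLast?)
def pvFoldA : Option (List (String × String)) → String → List (String × String) → String
  | _, acc, [] => acc
  | ts, acc, (k, v) :: rest =>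
      pvFoldA ts
        (if ((ts.getD []).map Prod.fst).getLast? = some k then
          acc ++ "+ " ++ k ++ ", " ++ v ++ "\n"
         else
          acc ++ "+ " ++ k ++ ", " ++ v ++ "," ++ "\n")
        rest

def add_transient_time_schedule (time_schedule : Option (List (String × String))) : Option String :=
  match time_schedule with
  | none => none
  | some l =>
      if l.length = 0 then none
      else some (pvFoldA (some l) "+ {SCHEDULE(\n" l ++ "+)}")

-- ===== PORT B =====
-- rows = [f'+ {k}, {v}' …]
def pvRow (kv : String × String) : String := "+ " ++ kv.1 ++ ", " ++ kv.2
-- ',\n'.join(rows)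
def pvJoinRows : List String → String
  | [] => ""
  | [r] => r
  | r :: rs@(_ :: _) => r ++ ",\n" ++ pvJoinRows rs

def add_transient_time_schedule_alt (time_schedule : Option (List (String × String))) : Option String :=
  match time_schedule with
  | none => none
  | some [] => none
  | some l => some ("+ {SCHEDULE(\n" ++ pvJoinRows (l.map pvRow) ++ "\n+)}")

-- ===== PRECONDITION & SPEC =====
-- Pre_ excludes association lists with duplicate keys: a Python dict cannot contain them, and on such
-- lists A's "key == last key" test fires early by accident of its implementation.
def Pre_add_transient_time_schedule (time_schedule : Option (List (String × String))) : Prop :=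
  ((time_schedule.getD []).map Prod.fst).Nodup
instance (time_schedule : Option (List (String × String))) : Decidable (Pre_add_transient_time_schedule time_schedule) := by unfold Pre_add_transient_time_schedule; infer_instance

def pvWitness_add_transient_time_schedule : (Option (List (String × String))) :=
  some [("0", "1e-5"), ("0.5", "1e-4")]

def Spec_add_transient_time_schedule (time_schedule : Option (List (String × String))) (out : Option String) : Prop := out = add_transient_time_schedule_alt time_schedule
instance (time_schedule : Option (List (String × String))) (out : Option String) : Decidable (Spec_add_transient_time_schedule time_schedule out) := by unfold Spec_add_transient_time_schedule; infer_instance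

-- ===== CLAIM (what is proved, stated in full; the proofs are below) =====
def Claim_equal_add_transient_time_schedule : Prop := ∀ (time_schedule : Option (List (String × String))), Dom_add_transient_time_schedule time_schedule → Pre_add_transient_time_schedule time_schedule → Spec_add_transient_time_schedule time_schedule (add_transient_time_schedule time_schedule)

-- ===== LEMMAS AND PROOFS =====

-- A's fold over a nodup-keyed suffix whose last key is the whole list's last key equals
-- acc ++ joined rows ++ "\n".
theorem pvFoldA_eq (full : List (String × String)) :
    ∀ (l : List (String × String)) (acc : String), l ≠ [] →
    ((l.map Prod.fst).Nodup) →
    (full.map Prod.fst).getLast? = (l.map Prod.fst).getLast? →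
    pvFoldA (some full) acc l = acc ++ pvJoinRows (l.map pvRow) ++ "\n" := by
  intro l
  induction l with
  | nil => intro acc h; exact absurd rfl h
  | cons hd tl ih =>
    intro acc _ hnd hlast
    obtain ⟨k, v⟩ := hd
    cases tl with
    | nil =>
      simp [pvFoldA, pvJoinRows, pvRow, hlast, String.append_assoc]
    | cons hd2 tl2 =>
      have h0 : (k :: List.map Prod.fst (hd2 :: tl2)).Nodup := by
        simpa only [List.map_cons] using hnd
      have hnd' : ((hd2 :: tl2).map Prod.fst).Nodup := h0.of_cons
      have hlast' : (full.map Prod.fst).getLast? = ((hd2 :: tl2).map Prod.fst).getLast? := by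
        rw [hlast]; simp
      have hkmem : ¬ ((((some full).getD ([] : List (String × String))).map Prod.fst).getLast? = some k) := by
        simp only [Option.getD_some]
        rw [hlast']
        intro hcontra
        exact (List.nodup_cons.mp h0).1 (List.mem_of_getLast? hcontra)
      conv_lhs => rw [pvFoldA]
      rw [if_neg hkmem]
      rw [ih _ (by simp) hnd' hlast']
      simp [pvJoinRows, pvRow, String.append_assoc]

-- ===== VERDICT (by name: the statement is the Claim_ definition above) =====
theorem add_transient_time_schedule_spec : Claim_equal_add_transient_time_schedule := by
  intro ts _ hpre
  unfold Spec_add_transient_time_schedule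
  match ts with
  | none => rfl
  | some [] => rfl
  | some (hd :: tl) =>
    unfold add_transient_time_schedule add_transient_time_schedule_alt
    simp only [List.length_eq_zero_iff]
    have hnd : ((hd :: tl).map Prod.fst).Nodup := by
      simpa [Pre_add_transient_time_schedule] using hpre
    rw [pvFoldA_eq (hd :: tl) (hd :: tl) _ (by simp) hnd rfl]
    simp [String.append_assoc]
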